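-- pv_equiv track=rewrite | github.com/lmerchant/argovis_convert_netcdf_to_json | get_variable_mappings.py | create_goship_argovis_mapping
-- ===== SOURCE A (Python) =====
-- def get_goship_argovis_core_values_mapping(type):
--
--     return {
--         'pressure': f'pres',
--         'ctd_salinity': f'psal_{type}',
--         'ctd_salinity_qc': f'psal_{type}_qc',
--         'ctd_temperature': f'temp_{type}',
--         'ctd_temperature_qc': f'temp_{type}_qc',
--         'ctd_temperature_68': f'temp_{type}',
--         'ctd_temperature_68_qc': f'temp_{type}_qc',
--         'ctd_oxygen': f'doxy_{type}',
--         'ctd_oxygen_qc': f'doxy_{type}_qc',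
--         'ctd_oxygen_ml_l': f'doxy',
--         'ctd_oxygen_ml_l_qc': f'doxy_qc',
--         'bottle_salinity': f'salinity_{type}',
--         'bottle_salinity_qc': f'salinity_{type}_qc',
--         'latitude': 'lat',
--         'longitude': 'lon'
--     }
--
-- def create_goship_argovis_mapping(goship_names, type):
--
--     goship_argovis_mapping = get_goship_argovis_core_values_mapping(
--         type)
--
--     # Keep only keys that are in goship_names
--     goship_argovis_mapping = {
--         key: val for key, val in goship_argovis_mapping.items() if key in goship_names}
--
--     has_both_temp = 'ctd_temperature' in goship_names and 'ctd_temperature_68' in goship_names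
--
--     has_both_oxygen = 'ctd_oxygen' in goship_names and 'ctd_oxygen_ml_l' in goship_names
--
--     if has_both_temp:
--         goship_argovis_mapping.pop('ctd_temperature_68')
--         if 'ctd_temperature_68_qc' in goship_names:
--             goship_argovis_mapping.pop('ctd_temperature_68_qc')
--
--     if has_both_oxygen:
--         goship_argovis_mapping.pop('ctd_oxygen_ml_l')
--         if 'ctd_oxygen_ml_l_qc' in goship_names:
--             goship_argovis_mapping.pop('ctd_oxygen_ml_l_qc')
--
--     return goship_argovis_mapping
-- ===== SOURCE B (Python) =====
-- def create_goship_argovis_mapping(goship_names, type):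
--     # Compact 9-row spec (base name, argovis base, has-qc flag); qc names/values are
--     # DERIVED (base+'_qc'), and each conflicting alternate is dropped as a whole group
--     # when its preferred twin is also present, so no filter-then-pop pipeline is needed.
--     spec = [
--         ('pressure', 'pres', False),
--         ('ctd_salinity', f'psal_{type}', True),
--         ('ctd_temperature', f'temp_{type}', True),
--         ('ctd_temperature_68', f'temp_{type}', True),
--         ('ctd_oxygen', f'doxy_{type}', True),
--         ('ctd_oxygen_ml_l', 'doxy', True),
--         ('bottle_salinity', f'salinity_{type}', True),
--         ('latitude', 'lat', False),
--         ('longitude', 'lon', False),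
--     ]
--     preferred = {'ctd_temperature_68': 'ctd_temperature',
--                  'ctd_oxygen_ml_l': 'ctd_oxygen'}
--     present = set(goship_names)
--     out = {}
--     for base, argo, has_qc in spec:
--         if base in present and preferred.get(base) in present:
--             continue
--         if base in present:
--             out[base] = argo
--         if has_qc and base + '_qc' in present:
--             out[base + '_qc'] = argo + '_qc'
--     return out
-- ===== Notes on version B (the rewrite author's own statement) =====
-- stated objective: alternative
-- what changed: B replaces A's 15-entry dict / membership-filter / conditional-pop pipeline by a single accumulator loop over a compact 9-row (base, argovis, has_qc) spec in which the qc entries are derived as base+'_qc' and a conflicting alternate group is skipped inline via a preferred-twin table.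
import Mathlib
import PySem

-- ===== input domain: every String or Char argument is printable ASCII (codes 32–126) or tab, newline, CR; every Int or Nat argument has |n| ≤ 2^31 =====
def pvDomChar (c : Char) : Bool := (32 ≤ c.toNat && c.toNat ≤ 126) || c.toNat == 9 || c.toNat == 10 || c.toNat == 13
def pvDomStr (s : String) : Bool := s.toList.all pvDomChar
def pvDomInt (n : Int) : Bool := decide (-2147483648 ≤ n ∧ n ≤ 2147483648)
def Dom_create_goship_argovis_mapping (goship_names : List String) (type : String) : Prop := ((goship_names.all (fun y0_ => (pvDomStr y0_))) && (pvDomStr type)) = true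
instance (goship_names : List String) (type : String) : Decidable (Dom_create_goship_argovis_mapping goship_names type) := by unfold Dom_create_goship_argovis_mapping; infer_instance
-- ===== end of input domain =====

-- B builds the dict in one accumulator loop over a compact 9-row spec whose qc
-- entries are derived as base+'_qc', with conflicting alternates skipped inline
-- via a preferred-twin table (objective: alternative).

-- ===== PORT A =====
def get_goship_argovis_core_values_mapping (type : String) : PySem.Dict String String :=
  PySem.Dict.ofList
    [("pressure", "pres"),
     ("ctd_salinity", "psal_" ++ type),
     ("ctd_salinity_qc", "psal_" ++ type ++ "_qc"),
     ("ctd_temperature", "temp_" ++ type),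
     ("ctd_temperature_qc", "temp_" ++ type ++ "_qc"),
     ("ctd_temperature_68", "temp_" ++ type),
     ("ctd_temperature_68_qc", "temp_" ++ type ++ "_qc"),
     ("ctd_oxygen", "doxy_" ++ type),
     ("ctd_oxygen_qc", "doxy_" ++ type ++ "_qc"),
     ("ctd_oxygen_ml_l", "doxy"),
     ("ctd_oxygen_ml_l_qc", "doxy_qc"),
     ("bottle_salinity", "salinity_" ++ type),
     ("bottle_salinity_qc", "salinity_" ++ type ++ "_qc"),
     ("latitude", "lat"),
     ("longitude", "lon")]

-- Python's d.pop(k) here is always on a present key (guarded by has_both_* / the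
-- membership test), so discarding its return value it is exactly Dict.erase.
def create_goship_argovis_mapping (goship_names : List String) (type : String) : List (String × String) :=
  let d0 := get_goship_argovis_core_values_mapping type
  let d1 := PySem.Dict.ofList (d0.items.filter (fun p => goship_names.contains p.1))
  let has_both_temp := goship_names.contains "ctd_temperature" && goship_names.contains "ctd_temperature_68"
  let has_both_oxygen := goship_names.contains "ctd_oxygen" && goship_names.contains "ctd_oxygen_ml_l"
  let d2 :=
    if has_both_temp then
      let da := d1.erase "ctd_temperature_68"
      if goship_names.contains "ctd_temperature_68_qc" then da.erase "ctd_temperature_68_qc" else da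
    else d1
  let d3 :=
    if has_both_oxygen then
      let db := d2.erase "ctd_oxygen_ml_l"
      if goship_names.contains "ctd_oxygen_ml_l_qc" then db.erase "ctd_oxygen_ml_l_qc" else db
    else d2
  d3.items

-- ===== PORT B =====
-- the 9-row spec of Source B: (goship base name, argovis base name, has a qc variant)
def pvSpecTable (type : String) : List (String × String × Bool) :=
  [("pressure", "pres", false),
   ("ctd_salinity", "psal_" ++ type, true),
   ("ctd_temperature", "temp_" ++ type, true),
   ("ctd_temperature_68", "temp_" ++ type, true),
   ("ctd_oxygen", "doxy_" ++ type, true),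
   ("ctd_oxygen_ml_l", "doxy", true),
   ("bottle_salinity", "salinity_" ++ type, true),
   ("latitude", "lat", false),
   ("longitude", "lon", false)]

def pvPreferred : PySem.Dict String String :=
  PySem.Dict.ofList [("ctd_temperature_68", "ctd_temperature"), ("ctd_oxygen_ml_l", "ctd_oxygen")]

-- the loop body of Source B; `preferred.get(base) in present` is false when get returns
-- None (present holds only strings), hence the Option match.
def pvStep (present : PySem.Set String) (out : PySem.Dict String String)
    (row : String × String × Bool) : PySem.Dict String String :=
  let (base, argo, has_qc) := row
  if present.contains base &&
      (match pvPreferred.get? base with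
       | some p => present.contains p
       | none => false) then out
  else
    let out1 := if present.contains base then out.insert base argo else out
    if has_qc && present.contains (base ++ "_qc") then out1.insert (base ++ "_qc") (argo ++ "_qc") else out1

def create_goship_argovis_mapping_alt (goship_names : List String) (type : String) : List (String × String) :=
  let present : PySem.Set String := PySem.Set.ofList goship_names
  ((pvSpecTable type).foldl (pvStep present) PySem.Dict.empty).items

-- ===== PRECONDITION & SPEC =====
def Spec_create_goship_argovis_mapping (goship_names : List String) (type : String) (out : List (String × String)) : Prop := out = create_goship_argovis_mapping_alt goship_names type
instance (goship_names : List String) (type : String) (out : List (String × String)) : Decidable (Spec_create_goship_argovis_mapping goship_names type out) := by unfold Spec_create_goship_argovis_mapping; infer_instance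

-- ===== CLAIM (what is proved, stated in full; the proofs are below) =====
def Claim_equal_create_goship_argovis_mapping : Prop := ∀ (goship_names : List String) (type : String), Dom_create_goship_argovis_mapping goship_names type → Spec_create_goship_argovis_mapping goship_names type (create_goship_argovis_mapping goship_names type)

-- ===== LEMMAS AND PROOFS =====

-- the core table of A as a plain list (proof helper)
def pvCoreTable (type : String) : List (String × String) :=
  [("pressure", "pres"),
   ("ctd_salinity", "psal_" ++ type),
   ("ctd_salinity_qc", "psal_" ++ type ++ "_qc"),
   ("ctd_temperature", "temp_" ++ type),
   ("ctd_temperature_qc", "temp_" ++ type ++ "_qc"),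
   ("ctd_temperature_68", "temp_" ++ type),
   ("ctd_temperature_68_qc", "temp_" ++ type ++ "_qc"),
   ("ctd_oxygen", "doxy_" ++ type),
   ("ctd_oxygen_qc", "doxy_" ++ type ++ "_qc"),
   ("ctd_oxygen_ml_l", "doxy"),
   ("ctd_oxygen_ml_l_qc", "doxy_qc"),
   ("bottle_salinity", "salinity_" ++ type),
   ("bottle_salinity_qc", "salinity_" ++ type ++ "_qc"),
   ("latitude", "lat"),
   ("longitude", "lon")]

-- the (at most two) pairs one pvStep appends, as a pure list
def pvEmit (present : PySem.Set String) (row : String × String × Bool) : List (String × String) :=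
  if present.contains row.1 &&
      (match pvPreferred.get? row.1 with
       | some p => present.contains p
       | none => false) then []
  else
    (if present.contains row.1 then [(row.1, row.2.1)] else []) ++
    (if row.2.2 && present.contains (row.1 ++ "_qc") then [(row.1 ++ "_qc", row.2.1 ++ "_qc")] else [])

theorem pv_append_qc_ne (s : String) : s ++ "_qc" ≠ s := by
  intro h
  have := congrArg (fun t => t.toList.length) h
  simp at this

theorem pv_step_items (present : PySem.Set String) (d : PySem.Dict String String)
    (row : String × String × Bool)
    (hb : d.contains row.1 = false) (hq : d.contains (row.1 ++ "_qc") = false) :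
    (pvStep present d row).items = d.items ++ pvEmit present row := by
  obtain ⟨b, a, q⟩ := row
  simp only [pvStep, pvEmit] at *
  split_ifs <;>
    simp_all [PySem.Dict.items_insert_of_not_contains, PySem.Dict.contains_insert,
      pv_append_qc_ne b]

theorem pv_step_contains (present : PySem.Set String) (d : PySem.Dict String String)
    (row : String × String × Bool) (k : String) (h : d.contains k = false)
    (h1 : k ≠ row.1) (h2 : k ≠ row.1 ++ "_qc") :
    (pvStep present d row).contains k = false := by
  obtain ⟨b, a, q⟩ := row
  simp only [pvStep]
  split_ifs <;> simp_all [PySem.Dict.contains_insert]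

theorem pv_fold_items (present : PySem.Set String) :
    ∀ (rows : List (String × String × Bool)) (d : PySem.Dict String String),
    (∀ r ∈ rows, d.contains r.1 = false ∧ d.contains (r.1 ++ "_qc") = false) →
    rows.Pairwise (fun r s =>
      s.1 ≠ r.1 ∧ s.1 ≠ r.1 ++ "_qc" ∧ s.1 ++ "_qc" ≠ r.1 ∧ s.1 ++ "_qc" ≠ r.1 ++ "_qc") →
    (rows.foldl (pvStep present) d).items = d.items ++ rows.flatMap (pvEmit present)
  | [], d, _, _ => by simp
  | r :: rows, d, hf, hp => by
    have hr := hf r (by simp)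
    have hrec := pv_fold_items present rows (pvStep present d r)
      (fun s hs => by
        have hd := hf s (by simp [hs])
        have hns := (List.pairwise_cons.1 hp).1 s hs
        exact ⟨pv_step_contains present d r s.1 hd.1 hns.1 hns.2.1,
               pv_step_contains present d r (s.1 ++ "_qc") hd.2 hns.2.2.1 hns.2.2.2⟩)
      (List.Pairwise.of_cons hp)
    simp only [List.foldl_cons, List.flatMap_cons, hrec,
      pv_step_items present d r hr.1 hr.2, List.append_assoc]

-- items of ofList over a list with pairwise-distinct keys is that list
theorem pv_items_ofList {L : List (String × String)} (h : (L.map (·.1)).Nodup) :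
    (PySem.Dict.ofList L).items = L := by
  have := PySem.Dict.items_foldl_insert_fresh (l := L) (k := Prod.fst) (v := Prod.snd)
    (d := (PySem.Dict.empty : PySem.Dict String String)) (by simp) (by simpa using h)
  simpa [PySem.Dict.ofList, PySem.Dict.update] using this

theorem pv_set_contains (xs : List String) (x : String) :
    (PySem.Set.ofList xs).contains x = xs.contains x := by
  simp [PySem.Set.contains, PySem.Set.mem_ofList]

theorem pv_filter_eq_flatMap {α : Type} (p : α → Bool) (l : List α) :
    l.filter p = l.flatMap (fun a => if p a then [a] else []) := by
  induction l with
  | nil => rfl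
  | cons a l ih => by_cases h : p a <;> simp [h, ih]

-- the skip list of A, as a function of the names present
def pvSkip (names : List String) : List String :=
  (if names.contains "ctd_temperature" && names.contains "ctd_temperature_68"
     then ["ctd_temperature_68", "ctd_temperature_68_qc"] else []) ++
  (if names.contains "ctd_oxygen" && names.contains "ctd_oxygen_ml_l"
     then ["ctd_oxygen_ml_l", "ctd_oxygen_ml_l_qc"] else [])

set_option maxHeartbeats 1000000 in
theorem pv_A_eq_filter (names : List String) (type : String) :
    create_goship_argovis_mapping names type =
    (pvCoreTable type).filter
      (fun p => names.contains p.1 && !((pvSkip names).contains p.1)) := by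
  have hnd : ((pvCoreTable type).map (·.1)).Nodup := by
    simp [pvCoreTable]
  have hio : ∀ p, (PySem.Dict.ofList ((pvCoreTable type).filter p)).items
      = (pvCoreTable type).filter p :=
    fun p => pv_items_ofList (hnd.sublist (List.filter_sublist.map _))
  unfold create_goship_argovis_mapping
  dsimp only
  have hT0 : get_goship_argovis_core_values_mapping type
      = PySem.Dict.ofList (pvCoreTable type) := rfl
  rw [hT0, pv_items_ofList hnd]
  unfold pvSkip
  cases hT : (names.contains "ctd_temperature" && names.contains "ctd_temperature_68") <;>
  cases hO : (names.contains "ctd_oxygen" && names.contains "ctd_oxygen_ml_l") <;>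
  cases hTq : names.contains "ctd_temperature_68_qc" <;>
  cases hOq : names.contains "ctd_oxygen_ml_l_qc" <;>
    simp [PySem.Dict.erase, hio, List.filter_filter] <;>
    (apply List.filter_congr; intro p hp; fin_cases hp) <;>
    simp_all [pvCoreTable]

set_option maxHeartbeats 2000000 in
theorem pv_B_eq_filter (names : List String) (type : String) :
    (pvSpecTable type).flatMap (pvEmit (PySem.Set.ofList names)) =
    (pvCoreTable type).filter
      (fun p => names.contains p.1 && !((pvSkip names).contains p.1)) := by
  have e1 : pvPreferred.get? "pressure" = none := rfl
  have e2 : pvPreferred.get? "ctd_salinity" = none := rfl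
  have e3 : pvPreferred.get? "ctd_temperature" = none := rfl
  have e4 : pvPreferred.get? "ctd_temperature_68" = some "ctd_temperature" := rfl
  have e5 : pvPreferred.get? "ctd_oxygen" = none := rfl
  have e6 : pvPreferred.get? "ctd_oxygen_ml_l" = some "ctd_oxygen" := rfl
  have e7 : pvPreferred.get? "bottle_salinity" = none := rfl
  have e8 : pvPreferred.get? "latitude" = none := rfl
  have e9 : pvPreferred.get? "longitude" = none := rfl
  rw [pv_filter_eq_flatMap]
  by_cases hct : "ctd_temperature" ∈ names <;>
  by_cases hc68 : "ctd_temperature_68" ∈ names <;>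
  by_cases hco : "ctd_oxygen" ∈ names <;>
  by_cases hcml : "ctd_oxygen_ml_l" ∈ names <;>
    simp [pvSpecTable, pvCoreTable, pvEmit, pvSkip, pv_set_contains,
      e1, e2, e3, e4, e5, e6, e7, e8, e9, hct, hc68, hco, hcml,
      String.append_assoc]

-- ===== VERDICT (by name: the statement is the Claim_ definition above) =====
theorem create_goship_argovis_mapping_spec : Claim_equal_create_goship_argovis_mapping := by
  intro names type _
  unfold Spec_create_goship_argovis_mapping create_goship_argovis_mapping_alt
  dsimp only
  rw [pv_fold_items (PySem.Set.ofList names) (pvSpecTable type) PySem.Dict.empty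
        (by intro r hr; constructor <;> simp [PySem.Dict.contains_empty])
        (by simp [pvSpecTable, List.pairwise_cons]),
      pv_B_eq_filter, pv_A_eq_filter]
  simp [PySem.Dict.empty]
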